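-- pv_equiv track=rewrite | github.com/adiens916/NOTE-algorithm | problems/This_is_coding_test/2_O/13_18 괄호 변환.py | convert
-- ===== SOURCE A (Python) =====
-- def convert(w: str) -> str:
--     if w == "":
--         return ""
--
--     u, v = separate(w)
--     if is_proper(u):
--         return u + convert(v)
--     else:
--         front = "(" + convert(v) + ")"
--         back = mirror(u)
--         return front + back
--
-- def separate(w: str):
--     stack = 0
--     for i in range(len(w)):
--         if w[i] == "(":
--             stack -= 1
--         else:
--             stack += 1
--
--         if stack == 0:
--             return w[:i + 1], w[i + 1:]
--     return w, ""
--
-- def is_proper(u: str) -> bool: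
--     stack = 0
--     for i in range(len(u)):
--         if u[i] == "(":
--             stack -= 1
--         else:
--             stack += 1
--
--         if stack > 0:
--             return False
--     return True
--
-- def mirror(s: str) -> str:
--     result = []
--     for i in range(1, len(s) - 1):
--         if s[i] == "(":
--             result.append(")")
--         else:
--             result.append("(")
--     return ''.join(result)
-- ===== SOURCE B (Python) =====
-- def convert(w: str) -> str:
--     # Split w once into top-level units (depth counter returning to zero),
--     # then fold the units right-to-left.
--     units = []
--     depth = 0
--     start = 0
--     for i, c in enumerate(w):
--         depth += -1 if c == "(" else 1
--         if depth == 0: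
--             units.append(w[start:i + 1])
--             start = i + 1
--     if start < len(w):
--         units.append(w[start:])
--
--     rest = ""
--     for u in reversed(units):
--         if _proper(u):
--             rest = u + rest
--         else:
--             rest = "(" + rest + ")" + _mirror(u)
--     return rest
--
-- def _proper(u: str) -> bool:
--     d = 0
--     for c in u:
--         d += 1 if c == "(" else -1
--         if d < 0:
--             return False
--     return True
--
-- def _mirror(s: str) -> str:
--     flipped = [")" if c == "(" else "(" for c in s]
--     return "".join(flipped[1:-1])
-- ===== Notes on version B (the rewrite author's own statement) =====
-- stated objective: alternative
-- what changed: Replaced A's recursion (which re-scans the remainder via separate at every level) by a single scan that splits w into its top-level balanced units once, followed by one right-to-left fold building the result.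
import Mathlib
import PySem

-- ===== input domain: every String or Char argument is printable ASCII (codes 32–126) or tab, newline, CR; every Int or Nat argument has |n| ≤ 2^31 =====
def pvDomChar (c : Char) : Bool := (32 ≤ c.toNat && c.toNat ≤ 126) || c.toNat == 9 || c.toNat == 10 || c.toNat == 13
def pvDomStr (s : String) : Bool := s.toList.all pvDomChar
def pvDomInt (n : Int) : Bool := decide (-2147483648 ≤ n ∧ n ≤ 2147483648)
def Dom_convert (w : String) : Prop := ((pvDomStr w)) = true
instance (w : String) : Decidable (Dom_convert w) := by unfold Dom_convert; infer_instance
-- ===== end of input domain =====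

-- B replaces A's recursion (re-scan via separate at every level) by one scan splitting w
-- into top-level units followed by a single right-to-left fold; objective: alternative decomposition.

-- ===== PORT A =====
-- separate's loop: acc holds the consumed prefix (reversed), rest the remainder, stack the counter
def pvSepGo : List Char → List Char → Int → List Char × List Char
  | acc, [], _ => (acc.reverse, [])
  | acc, c :: rest, stack =>
    let stack' := if c = '(' then stack - 1 else stack + 1
    if stack' = 0 then ((c :: acc).reverse, rest) else pvSepGo (c :: acc) rest stack'

-- termination helper for pvConvertL (cited by name in decreasing_by)
theorem pvSepGo_snd_le : ∀ (rest acc : List Char) (s : Int),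
    (pvSepGo acc rest s).2.length ≤ rest.length - 1 := by
  intro rest
  induction rest with
  | nil => intro acc s; simp [pvSepGo]
  | cons c r ih =>
    intro acc s
    simp only [pvSepGo, List.length_cons]
    split_ifs
    · simp
    · exact le_trans (ih _ _) (by omega)
    · simp
    · exact le_trans (ih _ _) (by omega)

def pvIsProperGo : List Char → Int → Bool
  | [], _ => true
  | c :: rest, stack =>
    let stack' := if c = '(' then stack - 1 else stack + 1
    if stack' > 0 then false else pvIsProperGo rest stack'

def pvMirror (s : List Char) : List Char :=
  ((s.drop 1).dropLast).map (fun c => if c = '(' then ')' else '(')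

def pvConvertL (w : List Char) : List Char :=
  if h : w = [] then []
  else
    let p := pvSepGo [] w 0
    if pvIsProperGo p.1 0 then p.1 ++ pvConvertL p.2
    else '(' :: pvConvertL p.2 ++ ')' :: pvMirror p.1
termination_by w.length
decreasing_by
  all_goals
    have := pvSepGo_snd_le w [] 0
    have hlen : 0 < w.length := List.length_pos_iff.mpr h
    omega

def convert (w : String) : String := String.ofList (pvConvertL w.toList)

-- ===== PORT B =====
-- one scan cutting w into top-level units; acc = current unit (reversed), d = depth counter
def pvUnitsGo : List Char → List Char → Int → List (List Char)
  | [], acc, _ => if acc.isEmpty then [] else [acc.reverse]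
  | c :: r, acc, d =>
    let d' := if c = '(' then d - 1 else d + 1
    if d' = 0 then (c :: acc).reverse :: pvUnitsGo r [] 0 else pvUnitsGo r (c :: acc) d'

def pvProperB : List Char → Int → Bool
  | [], _ => true
  | c :: r, d =>
    let d' := if c = '(' then d + 1 else d - 1
    if d' < 0 then false else pvProperB r d'

def pvMirrorB (s : List Char) : List Char :=
  ((s.map (fun c => if c = '(' then ')' else '(')).drop 1).dropLast

def pvStep (u rest : List Char) : List Char :=
  if pvProperB u 0 then u ++ rest else '(' :: rest ++ ')' :: pvMirrorB u

def convert_alt (w : String) : String :=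
  String.ofList ((pvUnitsGo w.toList [] 0).foldr pvStep [])

-- ===== PRECONDITION & SPEC =====
def Spec_convert (w : String) (out : String) : Prop := out = convert_alt w
instance (w : String) (out : String) : Decidable (Spec_convert w out) := by unfold Spec_convert; infer_instance

-- ===== CLAIM (what is proved, stated in full; the proofs are below) =====
def Claim_equal_convert : Prop := ∀ (w : String), Dom_convert w → Spec_convert w (convert w)

-- ===== LEMMAS AND PROOFS =====

theorem proper_eq : ∀ (u : List Char) (s : Int), pvIsProperGo u s = pvProperB u (-s) := by
  intro u
  induction u with
  | nil => intro s; rfl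
  | cons c r ih =>
    intro s
    simp only [pvIsProperGo, pvProperB]
    by_cases hc : c = '('
    · simp only [hc, if_true]
      have h1 : (-s : Int) + 1 = -(s - 1) := by ring
      rw [h1]
      by_cases hs : s - 1 > 0
      · rw [if_pos hs, if_pos (by omega : (-(s-1) : Int) < 0)]
      · rw [if_neg hs, if_neg (by omega : ¬ (-(s-1) : Int) < 0), ih]
    · simp only [if_neg hc]
      have h1 : (-s : Int) - 1 = -(s + 1) := by ring
      rw [h1]
      by_cases hs : s + 1 > 0
      · rw [if_pos hs, if_pos (by omega : (-(s+1) : Int) < 0)]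
      · rw [if_neg hs, if_neg (by omega : ¬ (-(s+1) : Int) < 0), ih]

theorem mirror_eq (s : List Char) : pvMirror s = pvMirrorB s := by
  simp [pvMirror, pvMirrorB, List.map_dropLast]

theorem units_sep : ∀ (rest acc : List Char) (s : Int), acc ≠ [] ∨ rest ≠ [] →
    pvUnitsGo rest acc s
      = (pvSepGo acc rest s).1 :: pvUnitsGo (pvSepGo acc rest s).2 [] 0 := by
  intro rest
  induction rest with
  | nil =>
    intro acc s h
    have hacc : acc ≠ [] := by
      rcases h with h | h
      · exact h
      · exact absurd rfl h
    simp [pvUnitsGo, pvSepGo, hacc]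
  | cons c r ih =>
    intro acc s _
    simp only [pvUnitsGo, pvSepGo]
    split_ifs
    · rfl
    · exact ih _ _ (Or.inl (by simp))
    · rfl
    · exact ih _ _ (Or.inl (by simp))

theorem convert_eq_fold_aux : ∀ (n : Nat) (w : List Char), w.length ≤ n →
    pvConvertL w = (pvUnitsGo w [] 0).foldr pvStep [] := by
  intro n
  induction n with
  | zero =>
    intro w hw
    have hw0 : w = [] := List.length_eq_zero_iff.mp (Nat.le_zero.mp hw)
    subst hw0
    simp [pvConvertL, pvUnitsGo]
  | succ n ih =>
    intro w hw
    by_cases h : w = []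
    · subst h
      simp [pvConvertL, pvUnitsGo]
    · have hv : (pvSepGo [] w 0).2.length ≤ n := by
        have h1 := pvSepGo_snd_le w [] 0
        have h2 : 0 < w.length := List.length_pos_iff.mpr h
        omega
      have hpr := proper_eq (pvSepGo [] w 0).1 0
      rw [neg_zero] at hpr
      rw [units_sep w [] 0 (Or.inr h), List.foldr_cons, pvStep, ← hpr, ← mirror_eq,
        ← ih _ hv, pvConvertL, dif_neg h]

theorem convert_eq_fold (w : List Char) :
    pvConvertL w = (pvUnitsGo w [] 0).foldr pvStep [] :=
  convert_eq_fold_aux w.length w le_rfl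

-- ===== VERDICT (by name: the statement is the Claim_ definition above) =====
theorem convert_spec : Claim_equal_convert := by
  intro w _
  unfold Spec_convert convert convert_alt
  rw [convert_eq_fold]
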